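-- pv_equiv track=rewrite | github.com/alxwen711/contestSubmissionArchive | codeforces/live contests/2026-1/1082/d.py | maximal
-- ===== SOURCE A (Python) =====
-- def maximal(x):
--     ar = [1,2]
--     for i in range(2,x):
--         ar.append(i+1)
--         ar.append(i-1)
--     ar.append(x-1)
--     ar.append(x)
--     return ar
-- ===== SOURCE B (Python) =====
-- def maximal(x):
--     body = [(k // 2 + 2) if k % 2 == 0 else (k // 2) for k in range(2, 2 * x - 2)]
--     return [1, 2] + body + [x - 1, x]
-- ===== Notes on version B (the rewrite author's own statement) =====
-- stated objective: alternative
-- what changed: Replaces A's stateful two-appends-per-iteration loop by a closed-form per-position formula: one comprehension over output indices k in range(2, 2x-2), where each element is computed directly from k's parity (k//2+2 for even k, k//2 for odd k), with literal prefix and suffix.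
import Mathlib
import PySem

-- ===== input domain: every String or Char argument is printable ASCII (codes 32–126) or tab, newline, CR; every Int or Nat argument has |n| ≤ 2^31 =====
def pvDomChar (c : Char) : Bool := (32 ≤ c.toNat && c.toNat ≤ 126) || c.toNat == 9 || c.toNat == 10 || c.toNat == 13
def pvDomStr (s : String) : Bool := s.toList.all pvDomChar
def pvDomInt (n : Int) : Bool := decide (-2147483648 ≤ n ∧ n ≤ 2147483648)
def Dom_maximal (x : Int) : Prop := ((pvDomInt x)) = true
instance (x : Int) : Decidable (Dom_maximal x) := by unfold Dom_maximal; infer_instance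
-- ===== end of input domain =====

-- B computes each body element by a closed-form parity formula on its output index instead of A's stateful append-loop; alternative decomposition, same cost.


-- ===== PORT A =====
def maximal (x : Int) : List Int :=
  let ar : List Int := [1, 2]
  let ar := (PySem.List.pyRange 2 x 1).foldl (fun ar i => (ar ++ [i + 1]) ++ [i - 1]) ar
  let ar := ar ++ [x - 1]
  let ar := ar ++ [x]
  ar

-- ===== PORT B =====
def maximal_alt (x : Int) : List Int :=
  let body := (PySem.List.pyRange 2 (2 * x - 2) 1).map
    (fun k => if PySem.Int.mod k 2 == 0 then PySem.Int.floordiv k 2 + 2 else PySem.Int.floordiv k 2)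
  [1, 2] ++ body ++ [x - 1, x]

-- ===== PRECONDITION & SPEC =====
def Spec_maximal (x : Int) (out : List Int) : Prop := out = maximal_alt x
instance (x : Int) (out : List Int) : Decidable (Spec_maximal x out) := by unfold Spec_maximal; infer_instance

-- ===== CLAIM (what is proved, stated in full; the proofs are below) =====
def Claim_equal_maximal : Prop := ∀ (x : Int), Dom_maximal x → Spec_maximal x (maximal x)

-- ===== LEMMAS AND PROOFS =====

-- The index-formula body over 2n positions equals the pairwise flatMap body over n loop values.
theorem maximal_body_key (n : Nat) :
    (List.range (2 * n)).map
        (fun (j : Nat) => if PySem.Int.mod (2 + (j : Int)) 2 == 0 then PySem.Int.floordiv (2 + (j : Int)) 2 + 2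
                  else PySem.Int.floordiv (2 + (j : Int)) 2)
      = (List.range n).flatMap (fun (j : Nat) => [(2 + (j : Int)) + 1, (2 + (j : Int)) - 1]) := by
  induction n with
  | zero => simp
  | succ m ih =>
      have h2 : 2 * (m + 1) = (2 * m + 1) + 1 := by ring
      rw [h2, List.range_succ, List.range_succ, List.range_succ, List.flatMap_append,
          List.map_append, List.map_append, List.append_assoc, ih]
      congr 1
      have he : PySem.Int.mod (2 + (2 * m : Nat)) 2 = 0 := by
        rw [PySem.Int.mod_eq_emod_of_pos (by omega)]; push_cast; omega
      have ho : PySem.Int.mod (2 + ((2 * m + 1 : Nat) : Int)) 2 = 1 := by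
        rw [PySem.Int.mod_eq_emod_of_pos (by omega)]; push_cast; omega
      have hde : PySem.Int.floordiv (2 + (2 * m : Nat)) 2 = (m : Int) + 1 := by
        rw [PySem.Int.floordiv_eq_ediv_of_pos (by omega)]; push_cast; omega
      have hdo : PySem.Int.floordiv (2 + ((2 * m + 1 : Nat) : Int)) 2 = (m : Int) + 1 := by
        rw [PySem.Int.floordiv_eq_ediv_of_pos (by omega)]; push_cast; omega
      simp only [List.map_cons, List.map_nil, List.flatMap_cons, List.flatMap_nil, he, ho, hde, hdo]
      simp
      constructor <;> ring

theorem maximal_toNat_double (x : Int) : (2 * x - 2 - 2).toNat = 2 * (x - 2).toNat := by omega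

-- A's foldl accumulates exactly the flatMap of its two appends.
theorem maximal_foldl_eq (l acc : List Int) :
    l.foldl (fun ar i => (ar ++ [i + 1]) ++ [i - 1]) acc
      = acc ++ l.flatMap (fun i => [i + 1, i - 1]) := by
  induction l generalizing acc with
  | nil => simp
  | cons a t ih => rw [List.foldl_cons, ih, List.flatMap_cons]; simp [List.append_assoc]

-- ===== VERDICT (by name: the statement is the Claim_ definition above) =====
theorem maximal_spec : Claim_equal_maximal := by
  intro x _
  unfold Spec_maximal maximal maximal_alt
  simp only []
  rw [maximal_foldl_eq, PySem.List.pyRange_one 2 x, PySem.List.pyRange_one 2 (2 * x - 2),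
      maximal_toNat_double, List.map_map]
  simp only [Function.comp_def]
  rw [maximal_body_key]
  simp [List.flatMap_map, List.append_assoc]
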